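-- pv_equiv track=rewrite | github.com/catherine-joyce/advent-of-code-2025 | day-7/test_day7_part2.py | create_viable_paths_dictionary
-- ===== SOURCE A (Python) =====
-- def create_viable_paths_dictionary(data):
--     for i in range(len(data), 1, -1):
--         total_splitters = set()
--         for below_row_splitter_position, below_row_beam_positions in data[i].items():
--             total_splitters.add(below_row_splitter_position)
--         for above_row_splitter_position, above_row_beam_positions in data[i-1].items():
--             current_beam_positions_set = above_row_beam_positions["beam_positions"].copy()
--             for position in current_beam_positions_set:
--                 if position not in total_splitters:
--                     data[i-1][above_row_splitter_position]["beam_positions"].remove(position)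
--     for i in range(len(data), 1, -1):
--         beam_positions_set = set()
--         for above_row_splitter_position, above_row_beam_positions in data[i-1].items():
--             beam_positions_set.update(above_row_beam_positions["beam_positions"])
--         splitters = set()
--         for below_row_splitter_position, below_row_beam_positions in data[i].items():
--             if below_row_splitter_position not in beam_positions_set or len(data[i][below_row_splitter_position]["beam_positions"]) == 0:
--                 splitters.add(below_row_splitter_position)
--         for unviable_splitter in splitters:
--             del data[i][unviable_splitter]
--
--
--     return data
-- ===== SOURCE B (Python) =====
-- def create_viable_paths_dictionary(data):
--     # Functional re-implementation: builds a fresh dict in two forward map passes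
--     # (A mutates its argument in place; B leaves it untouched -- return value is the same).
--     n = len(data)
--     filtered = {}
--     for r, row in data.items():
--         if 1 <= r <= n - 1:
--             below = data[r + 1]
--             filtered[r] = {
--                 s: {**e, "beam_positions": [p for p in e["beam_positions"] if p in below]}
--                 for s, e in row.items()
--             }
--         else:
--             filtered[r] = row
--     result = {}
--     for r, row in filtered.items():
--         if 2 <= r <= n:
--             above_beams = set()
--             for e in filtered[r - 1].values():
--                 above_beams.update(e["beam_positions"])
--             result[r] = {
--                 s: e
--                 for s, e in row.items()
--                 if s in above_beams and len(e["beam_positions"]) > 0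
--             }
--         else:
--             result[r] = row
--     return result
-- ===== Notes on version B (the rewrite author's own statement) =====
-- stated objective: simpler
-- what changed: A makes two separate descending in-place mutation passes over the row dictionary (remove beam positions with set lookups and .remove, then delete unviable splitters with del); B is purely functional: it rebuilds the result with two forward passes of dict/list comprehensions (filter each row's beams against the next row's keys, then keep only splitters covered by the filtered row above), never mutating anything.
-- outside the precondition, e.g. on create_viable_paths_dictionary({1: {}, 2: {5: {}}}): A returns {1: {}, 2: {}}, B returns {1: {}, 2: {}}
import Mathlib
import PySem

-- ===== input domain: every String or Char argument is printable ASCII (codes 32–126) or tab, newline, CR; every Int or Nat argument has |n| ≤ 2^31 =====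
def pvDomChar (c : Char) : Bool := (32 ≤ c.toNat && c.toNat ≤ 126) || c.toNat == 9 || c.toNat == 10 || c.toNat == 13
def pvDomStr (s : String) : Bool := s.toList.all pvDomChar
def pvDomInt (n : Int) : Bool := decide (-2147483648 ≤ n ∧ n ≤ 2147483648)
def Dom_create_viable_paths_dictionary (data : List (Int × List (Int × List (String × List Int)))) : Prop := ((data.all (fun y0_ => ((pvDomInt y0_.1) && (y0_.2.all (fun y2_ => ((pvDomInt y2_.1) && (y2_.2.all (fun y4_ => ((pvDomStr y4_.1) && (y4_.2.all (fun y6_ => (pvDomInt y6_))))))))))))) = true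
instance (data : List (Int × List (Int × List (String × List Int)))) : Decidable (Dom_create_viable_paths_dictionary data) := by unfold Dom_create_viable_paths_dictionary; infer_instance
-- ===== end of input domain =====

-- B rebuilds the result functionally in two forward map passes instead of A's two descending
-- in-place mutation passes (objective: simpler); A mutates its argument, B does not — the
-- equivalence proved here is about the return value only.

-- shared assoc-list primitives (Python dicts are modelled as nodup-key assoc lists; Pre_ excludes duplicate keys)
def pvGet {K V : Type} [BEq K] (d : List (K × V)) (k : K) (dflt : V) : V :=
  match d with
  | [] => dflt
  | p :: t => if p.1 == k then p.2 else pvGet t k dflt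

def pvMod {K V : Type} [BEq K] (d : List (K × V)) (k : K) (f : V → V) : List (K × V) :=
  d.map (fun p => if p.1 == k then (p.1, f p.2) else p)

def pvDel {K V : Type} [BEq K] (d : List (K × V)) (k : K) : List (K × V) :=
  d.filter (fun p => !(p.1 == k))

-- ===== PORT A =====
def create_viable_paths_dictionary (data : List (Int × List (Int × List (String × List Int)))) : List (Int × List (Int × List (String × List Int))) :=
  let n : Int := (data.length : Int)
  let d1 := (PySem.List.pyRange n 1 (-1)).foldl (fun d i =>
    let total_splitters : PySem.Set Int :=
      (pvGet d i []).foldl (fun s p => PySem.Set.add s p.1) PySem.Set.empty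
    (pvGet d (i-1) []).foldl (fun d p =>
      -- current_beam_positions_set = data[i-1][pos]["beam_positions"].copy()  (read live, value untouched so far)
      let c := pvGet (pvGet (pvGet d (i-1) []) p.1 []) "beam_positions" []
      c.foldl (fun d pos =>
        if !(PySem.Set.contains total_splitters pos) then
          pvMod d (i-1) (fun row => pvMod row p.1 (fun e =>
            pvMod e "beam_positions" (fun l => (PySem.List.remove? l pos).getD l)))
        else d) d) d) data
  (PySem.List.pyRange n 1 (-1)).foldl (fun d i =>
    let beam_set : PySem.Set Int :=
      (pvGet d (i-1) []).foldl (fun s p => PySem.Set.update s (pvGet p.2 "beam_positions" [])) PySem.Set.empty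
    let splitters : PySem.Set Int :=
      (pvGet d i []).foldl (fun s p =>
        if !(PySem.Set.contains beam_set p.1)
            || (pvGet (pvGet (pvGet d i []) p.1 []) "beam_positions" []).length == 0
        then PySem.Set.add s p.1 else s) PySem.Set.empty
    -- 'for unviable in splitters: del data[i][unviable]': deletions commute, result is set-iteration-order independent
    splitters.foldl (fun d k => pvMod d i (fun row => pvDel row k)) d) d1

-- ===== PORT B =====
-- {**e, "beam_positions": v}: overwrite in place if present, append if absent
def pvSet {K V : Type} [BEq K] (d : List (K × V)) (k : K) (v : V) : List (K × V) :=
  if d.any (fun p => p.1 == k) then pvMod d k (fun _ => v) else d ++ [(k, v)]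

def create_viable_paths_dictionary_alt (data : List (Int × List (Int × List (String × List Int)))) : List (Int × List (Int × List (String × List Int))) :=
  let n : Int := (data.length : Int)
  let filtered := data.map (fun rr =>
    if 1 ≤ rr.1 ∧ rr.1 ≤ n - 1 then
      let below := pvGet data (rr.1 + 1) []
      (rr.1, rr.2.map (fun se =>
        (se.1, pvSet se.2 "beam_positions"
          ((pvGet se.2 "beam_positions" []).filter (fun p => below.any (fun q => q.1 == p))))))
    else rr)
  filtered.map (fun rr =>
    if 2 ≤ rr.1 ∧ rr.1 ≤ n then
      let above_beams : PySem.Set Int :=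
        (pvGet filtered (rr.1 - 1) []).foldl
          (fun s p => PySem.Set.update s (pvGet p.2 "beam_positions" [])) PySem.Set.empty
      (rr.1, rr.2.filter (fun se =>
        PySem.Set.contains above_beams se.1 && decide (0 < (pvGet se.2 "beam_positions" []).length)))
    else rr)

-- ===== PRECONDITION & SPEC =====
-- Pre_ excludes assoc lists with duplicate keys at any level (a Python dict cannot hold them, so
-- that behaviour is accidental), inputs where the Python A raises KeyError (a row index in 2..n or
-- 1..n-1 missing, or a "beam_positions" key missing from an entry it reads), and — because A's
-- short-circuit can skip a bottom-row entry lacking "beam_positions" — a few inputs where A still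
-- returns; see the cite.
def Pre_create_viable_paths_dictionary (data : List (Int × List (Int × List (String × List Int)))) : Prop :=
  (data.map Prod.fst).Nodup ∧
  (∀ p ∈ data, (p.2.map Prod.fst).Nodup ∧ ∀ q ∈ p.2, (q.2.map Prod.fst).Nodup) ∧
  (data.length ≤ 1 ∨
    ((∀ k ∈ List.range data.length, ∃ p ∈ data, p.1 = (k : Int) + 1) ∧
     (∀ p ∈ data, ∀ q ∈ p.2, "beam_positions" ∈ q.2.map Prod.fst)))

instance (data : List (Int × List (Int × List (String × List Int)))) : Decidable (Pre_create_viable_paths_dictionary data) := by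
  unfold Pre_create_viable_paths_dictionary; infer_instance

def pvWitness_create_viable_paths_dictionary : (List (Int × List (Int × List (String × List Int)))) :=
  [(1, [(3, [("beam_positions", [4])])]), (2, [(4, [("beam_positions", [3, 5])])])]

def Spec_create_viable_paths_dictionary (data : List (Int × List (Int × List (String × List Int)))) (out : List (Int × List (Int × List (String × List Int)))) : Prop := out = create_viable_paths_dictionary_alt data
instance (data : List (Int × List (Int × List (String × List Int)))) (out : List (Int × List (Int × List (String × List Int)))) : Decidable (Spec_create_viable_paths_dictionary data out) := by
  unfold Spec_create_viable_paths_dictionary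
  letI i1 : DecidableEq (List (String × List Int)) := inferInstance
  letI i2 : DecidableEq (Int × List (String × List Int)) := inferInstance
  letI i3 : DecidableEq (List (Int × List (String × List Int))) := @List.hasDecEq _ i2
  letI i4 : DecidableEq (Int × List (Int × List (String × List Int))) := @instDecidableEqProd _ _ _ i3
  exact @List.hasDecEq _ i4 _ _

-- ===== CLAIM (what is proved, stated in full; the proofs are below) =====
def Claim_equal_create_viable_paths_dictionary : Prop := ∀ (data : List (Int × List (Int × List (String × List Int)))), Dom_create_viable_paths_dictionary data → Pre_create_viable_paths_dictionary data → Spec_create_viable_paths_dictionary data (create_viable_paths_dictionary data)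

-- ===== LEMMAS AND PROOFS =====

def keyMem {K V : Type} [BEq K] (d : List (K × V)) (k : K) : Bool := d.any (fun p => p.1 == k)


theorem keys_pvMod {K V : Type} [BEq K] (d : List (K × V)) (k : K) (f : V → V) :
    (pvMod d k f).map Prod.fst = d.map Prod.fst := by
  induction d with
  | nil => rfl
  | cons p t ih => simp only [pvMod, List.map_cons] at *; split <;> simp_all

theorem pvGet_absent {K V : Type} [BEq K] (d : List (K × V)) (k : K) (dflt : V)
    (h : keyMem d k = false) : pvGet d k dflt = dflt := by
  induction d with
  | nil => rfl
  | cons p t ih =>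
    simp only [keyMem, List.any_cons, Bool.or_eq_false_iff] at h
    simp [pvGet, h.1]
    exact ih h.2

theorem pvGet_pvMod_self {K V : Type} [BEq K] (d : List (K × V)) (k : K) (f : V → V) (dflt : V) :
    pvGet (pvMod d k f) k dflt = if keyMem d k then f (pvGet d k dflt) else dflt := by
  induction d with
  | nil => rfl
  | cons p t ih =>
    cases h : p.1 == k
    · simp only [pvMod, List.map_cons, h, Bool.false_eq_true, if_false, pvGet, keyMem,
        List.any_cons, Bool.false_or] at *
      simpa [h] using ih
    · simp [pvMod, pvGet, keyMem, h]

theorem pvGet_pvMod_ne {K V : Type} [BEq K] [LawfulBEq K] (d : List (K × V)) (k j : K) (f : V → V)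
    (dflt : V) (h : j ≠ k) : pvGet (pvMod d k f) j dflt = pvGet d j dflt := by
  induction d with
  | nil => rfl
  | cons p t ih =>
    by_cases hk : p.1 == k
    · have hj : (p.1 == j) = false := by
        have := eq_of_beq hk; subst this
        exact beq_eq_false_iff_ne.2 (fun e => h e.symm)
      simp only [pvMod, List.map_cons, if_pos hk, pvGet, hj] at *
      simpa [hj] using ih
    · simp only [pvMod, List.map_cons, if_neg hk, pvGet] at *
      by_cases hj : p.1 == j
      · simp [hj]
      · simpa [hj] using ih

theorem pvMod_absent {K V : Type} [BEq K] (d : List (K × V)) (k : K) (f : V → V)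
    (h : keyMem d k = false) : pvMod d k f = d := by
  induction d with
  | nil => rfl
  | cons p t ih =>
    simp only [keyMem, List.any_cons, Bool.or_eq_false_iff] at h
    simp only [pvMod, List.map_cons, h.1, Bool.false_eq_true, if_false] at *
    rw [ih h.2]

theorem pvMod_id {K V : Type} [BEq K] (d : List (K × V)) (k : K) :
    pvMod d k (fun v => v) = d := by
  induction d with
  | nil => rfl
  | cons p t ih => simp only [pvMod, List.map_cons] at *; split <;> simp_all

theorem pvMod_pvMod {K V : Type} [BEq K] (d : List (K × V)) (k : K) (f g : V → V) :
    pvMod (pvMod d k f) k g = pvMod d k (fun v => g (f v)) := by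
  induction d with
  | nil => rfl
  | cons p t ih =>
    simp only [pvMod, List.map_cons] at *
    by_cases h : p.1 == k <;> simp_all

theorem pvGet_of_mem {K V : Type} [BEq K] [LawfulBEq K] (d : List (K × V)) (k : K) (v : V)
    (dflt : V) (hnd : (d.map Prod.fst).Nodup) (hm : (k, v) ∈ d) : pvGet d k dflt = v := by
  induction d with
  | nil => simp at hm
  | cons p t ih =>
    simp only [List.map_cons, List.nodup_cons] at hnd
    rcases List.mem_cons.1 hm with h | h
    · subst h; simp [pvGet]
    · have hne : (p.1 == k) = false := by
        cases hb : p.1 == k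
        · rfl
        · exact absurd (by rw [eq_of_beq hb]; exact List.mem_map.2 ⟨(k, v), h, rfl⟩) hnd.1
      simp only [pvGet, hne, Bool.false_eq_true, if_false]
      exact ih hnd.2 h

theorem mem_eq_of_nodup {K V : Type} [BEq K] [LawfulBEq K] (d : List (K × V)) (p q : K × V)
    (hnd : (d.map Prod.fst).Nodup) (hp : p ∈ d) (hq : q ∈ d) (hk : p.1 = q.1) : p = q := by
  have h1 : pvGet d p.1 p.2 = p.2 := pvGet_of_mem d p.1 p.2 p.2 hnd (by simpa using hp)
  have h2 : pvGet d p.1 p.2 = q.2 := by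
    rw [hk]; exact pvGet_of_mem d q.1 q.2 p.2 hnd (by simpa using hq)
  exact Prod.ext hk (by rw [← h1, h2])

theorem keyMem_false_of_nodup_head {K V : Type} [BEq K] [LawfulBEq K] (p : K × V)
    (t : List (K × V)) (hnd : ((p :: t).map Prod.fst).Nodup) : keyMem t p.1 = false := by
  simp only [List.map_cons, List.nodup_cons] at hnd
  cases hb : keyMem t p.1
  · rfl
  · exfalso
    simp only [keyMem, List.any_eq_true] at hb
    obtain ⟨q, hq, hqk⟩ := hb
    exact hnd.1 (List.mem_map.2 ⟨q, hq, eq_of_beq hqk⟩)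

theorem pvMod_congr_at {K V : Type} [BEq K] [LawfulBEq K] (d : List (K × V)) (k : K) (f g : V → V)
    (dflt : V) (hnd : (d.map Prod.fst).Nodup) (h : f (pvGet d k dflt) = g (pvGet d k dflt)) :
    pvMod d k f = pvMod d k g := by
  induction d with
  | nil => rfl
  | cons p t ih =>
    by_cases hk : p.1 == k
    · have hkk : p.1 = k := eq_of_beq hk
      have hv : pvGet (p :: t) k dflt = p.2 := by simp [pvGet, hk]
      rw [hv] at h
      have habs : keyMem t k = false := by rw [← hkk]; exact keyMem_false_of_nodup_head p t hnd
      simp only [pvMod, List.map_cons, if_pos hk]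
      show (p.1, f p.2) :: pvMod t k f = (p.1, g p.2) :: pvMod t k g
      rw [pvMod_absent t k f habs, pvMod_absent t k g habs, h]
    · have hv : pvGet (p :: t) k dflt = pvGet t k dflt := by simp [pvGet, hk]
      rw [hv] at h
      simp only [List.map_cons, List.nodup_cons] at hnd
      show (if p.1 == k then (p.1, f p.2) else p) :: pvMod t k f
        = (if p.1 == k then (p.1, g p.2) else p) :: pvMod t k g
      rw [ih hnd.2 h]
      simp [hk]

theorem bool_ext {a b : Bool} (h : (a = true) ↔ (b = true)) : a = b := by
  cases a <;> cases b <;> simp_all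

theorem foldl_pvDel {K V : Type} [BEq K] (ks : List K) (r : List (K × V)) :
    ks.foldl pvDel r = r.filter (fun p => !(ks.any (fun x => p.1 == x))) := by
  induction ks generalizing r with
  | nil => simp [List.filter_true]
  | cons k ks ih =>
    rw [List.foldl_cons, ih]
    show (pvDel r k).filter _ = _
    rw [pvDel, List.filter_filter]
    apply List.filter_congr
    intro p _
    simp [Bool.and_comm]

theorem foldl_pvMod_if {K V α : Type} [BEq K] (c : List α) (d : List (K × V)) (k : K)
    (P : α → Bool) (F : α → V → V) :
    c.foldl (fun d x => if P x then pvMod d k (F x) else d) d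
      = pvMod d k (fun v => c.foldl (fun v x => if P x then F x v else v) v) := by
  induction c generalizing d with
  | nil => simp [pvMod_id]
  | cons x c ih =>
    cases h : P x
    · simp only [List.foldl_cons, h, Bool.false_eq_true, if_false]
      rw [ih]
    · simp only [List.foldl_cons, h, if_true]
      rw [ih, pvMod_pvMod]

theorem mem_foldl_update {β : Type} (l : List β) (g : β → List Int) (s : PySem.Set Int) (x : Int) :
    x ∈ l.foldl (fun s p => PySem.Set.update s (g p)) s ↔ x ∈ s ∨ ∃ p ∈ l, x ∈ g p := by
  induction l generalizing s with
  | nil => simp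
  | cons p l ih =>
    rw [List.foldl_cons, ih]
    simp [PySem.Set.mem_update]
    tauto

theorem mem_foldl_add_if {β : Type} (l : List β) (C : β → Bool) (key : β → Int)
    (s : PySem.Set Int) (x : Int) :
    x ∈ l.foldl (fun s p => if C p then PySem.Set.add s (key p) else s) s
      ↔ x ∈ s ∨ ∃ p ∈ l, C p = true ∧ x = key p := by
  induction l generalizing s with
  | nil => simp
  | cons p l ih =>
    rw [List.foldl_cons]
    cases h : C p
    · simp only [Bool.false_eq_true, if_false, ih, List.mem_cons]
      constructor
      · rintro (hs | ⟨q, hq, hc, he⟩)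
        · exact Or.inl hs
        · exact Or.inr ⟨q, Or.inr hq, hc, he⟩
      · rintro (hs | ⟨q, (rfl | hq), hc, he⟩)
        · exact Or.inl hs
        · rw [h] at hc; cases hc
        · exact Or.inr ⟨q, hq, hc, he⟩
    · rw [if_pos rfl, ih]
      simp only [PySem.Set.mem_add, List.mem_cons]
      constructor
      · rintro ((hs | he) | ⟨q, hq, hc, he⟩)
        · exact Or.inl hs
        · exact Or.inr ⟨p, Or.inl rfl, h, he⟩
        · exact Or.inr ⟨q, Or.inr hq, hc, he⟩
      · rintro (hs | ⟨q, (rfl | hq), hc, he⟩)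
        · exact Or.inl (Or.inl hs)
        · exact Or.inl (Or.inr he)
        · exact Or.inr ⟨q, hq, hc, he⟩

theorem pyRange_desc (n : Int) :
    PySem.List.pyRange n 1 (-1)
      = (List.range (n - 1).toNat).map (fun k : Nat => n - (k : Int)) := by
  show (if (-1 : Int) = 0 then _ else _) = _
  rw [if_neg (by norm_num), if_neg (show ¬ (0 : Int) < -1 by norm_num)]
  have hd : (n - 1 + - -1 - 1) / - -1 = n - 1 := by norm_num
  have hc : (if 1 < n then ((n - 1 + - -1 - 1) / - -1).toNat else 0) = (n - 1).toNat := by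
    rw [hd]; split <;> omega
  rw [hc]
  apply List.map_congr_left
  intro k _
  ring

theorem mem_pyRange_desc (n x : Int) :
    x ∈ PySem.List.pyRange n 1 (-1) ↔ 2 ≤ x ∧ x ≤ n := by
  rw [pyRange_desc]
  simp only [List.mem_map, List.mem_range]
  constructor
  · rintro ⟨k, hk, rfl⟩; omega
  · rintro ⟨h2, hn⟩; exact ⟨(n - x).toNat, by omega, by omega⟩

theorem pairwise_gt_pyRange_desc (n : Int) :
    (PySem.List.pyRange n 1 (-1)).Pairwise (· > ·) := by
  rw [pyRange_desc, List.pairwise_map]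
  exact List.pairwise_lt_range.imp (fun {a b} h => by omega)

theorem nodup_pyRange_desc (n : Int) : (PySem.List.pyRange n 1 (-1)).Nodup :=
  (pairwise_gt_pyRange_desc n).imp (fun h => by omega)

abbrev PvInner := List (String × List Int)
abbrev PvRow := List (Int × PvInner)
abbrev PvTop := List (Int × PvRow)

def filtE (good : Int → Bool) (e : PvInner) : PvInner :=
  pvMod e "beam_positions" (fun l => l.filter good)

def filtRowA (good : Int → Bool) (r : PvRow) : PvRow :=
  r.map (fun se => (se.1, filtE good se.2))

def procKeys (good : Int → Bool) (xs : PvRow) (r : PvRow) : PvRow :=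
  r.map (fun se => if keyMem xs se.1 then (se.1, filtE good se.2) else se)

def beamB (row : PvRow) (x : Int) : Bool :=
  decide (∃ p ∈ row, x ∈ pvGet p.2 "beam_positions" [])

def keepB (row : PvRow) (se : Int × PvInner) : Bool :=
  beamB row se.1 && !((pvGet se.2 "beam_positions" []).length == 0)

theorem remove_getD_eq_erase {α : Type} [BEq α] [LawfulBEq α] (l : List α) (x : α) :
    (PySem.List.remove? l x).getD l = l.erase x := by
  rw [List.erase_eq_eraseIdx]
  show (Option.map (l.eraseIdx ·) (List.idxOf? x l)).getD l = _
  cases h : List.idxOf? x l <;> simp [h]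

theorem keyMem_eq_false_iff {K V : Type} [BEq K] [LawfulBEq K] (d : List (K × V)) (k : K) :
    keyMem d k = false ↔ k ∉ d.map Prod.fst := by
  simp only [keyMem]
  rw [← Bool.not_eq_true, List.any_eq_true]
  constructor
  · intro h hm
    obtain ⟨q, hq, he⟩ := List.mem_map.1 hm
    exact h ⟨q, hq, by simp [he]⟩
  · intro h hex
    obtain ⟨q, hq, he⟩ := hex
    exact h (List.mem_map.2 ⟨q, hq, (eq_of_beq he)⟩)
theorem keyMem_append {K V : Type} [BEq K] (xs ys : List (K × V)) (k : K) :
    keyMem (xs ++ ys) k = (keyMem xs k || keyMem ys k) := by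
  simp [keyMem, List.any_append]

theorem keyMem_of_mem {K V : Type} [BEq K] [LawfulBEq K] {r : List (K × V)} {p : K × V}
    (h : p ∈ r) : keyMem r p.1 = true := by
  simp only [keyMem, List.any_eq_true]
  exact ⟨p, h, by simp⟩

theorem pvGet_mapIf {K V : Type} [BEq K] [LawfulBEq K] (r : List (K × V)) (C : K → Bool)
    (h : V → V) (p : K × V) (dflt : V) (hnd : (r.map Prod.fst).Nodup) (hm : p ∈ r) :
    pvGet (r.map (fun se => if C se.1 then (se.1, h se.2) else se)) p.1 dflt
      = if C p.1 then h p.2 else p.2 := by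
  induction r with
  | nil => simp at hm
  | cons q t ih =>
    simp only [List.map_cons, List.nodup_cons] at hnd
    rcases List.mem_cons.1 hm with rfl | hm'
    · have : ((if C p.1 then (p.1, h p.2) else p).1 == p.1) = true := by
        split <;> simp
      cases hc : C p.1 <;> simp [pvGet, hc]
    · have hne : (q.1 == p.1) = false := by
        cases hb : q.1 == p.1
        · rfl
        · exact absurd (by rw [eq_of_beq hb]; exact List.mem_map.2 ⟨p, hm', rfl⟩) hnd.1
      have : ((if C q.1 then (q.1, h q.2) else q).1 == p.1) = false := by
        split <;> exact hne
      simp only [List.map_cons, pvGet, this, Bool.false_eq_true, if_false]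
      exact ih hnd.2 hm'

theorem fst_map_filtRowA (good : Int → Bool) (r : PvRow) :
    (filtRowA good r).map Prod.fst = r.map Prod.fst := by
  simp [filtRowA, List.map_map]

theorem keyMem_filtRowA (good : Int → Bool) (r : PvRow) (x : Int) :
    keyMem (filtRowA good r) x = keyMem r x := by
  simp only [filtRowA, keyMem, List.any_map]
  rfl

theorem foldl_pvMod {K V α : Type} [BEq K] (c : List α) (d : List (K × V)) (k : K)
    (F : α → V → V) :
    c.foldl (fun d x => pvMod d k (F x)) d = pvMod d k (fun v => c.foldl (fun v x => F x v) v) := by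
  induction c generalizing d with
  | nil => simp [pvMod_id]
  | cons x c ih =>
    simp only [List.foldl_cons]
    rw [ih, pvMod_pvMod]

theorem foldl_remove_filter (good : Int → Bool) :
    ∀ (cs pre : List Int), (∀ x ∈ pre, good x = true) →
    cs.foldl (fun l x => if !(good x) then (PySem.List.remove? l x).getD l else l) (pre ++ cs)
      = pre ++ cs.filter good := by
  intro cs
  induction cs with
  | nil => intro pre _; simp
  | cons x cs ih =>
    intro pre hpre
    rw [List.foldl_cons]
    cases hg : good x
    · have hx : x ∉ pre := fun hm => by rw [hpre x hm] at hg; cases hg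
      rw [if_pos (by simp [hg]), remove_getD_eq_erase, List.erase_append_right _ hx,
        List.erase_cons_head, ih pre hpre]
      simp [List.filter_cons, hg]
    · rw [if_neg (by simp [hg])]
      have : pre ++ x :: cs = (pre ++ [x]) ++ cs := by simp
      have hpre' : ∀ y ∈ pre ++ [x], good y = true := by
        intro y hy
        rcases List.mem_append.1 hy with h | h
        · exact hpre y h
        · simp at h; subst h; exact hg
      rw [this, ih (pre ++ [x]) hpre']
      simp [List.filter_cons, hg]

theorem pvGet_mem {K V : Type} [BEq K] [LawfulBEq K] (d : List (K × V)) (k : K) (dflt : V)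
    (h : keyMem d k = true) : (k, pvGet d k dflt) ∈ d := by
  induction d with
  | nil => cases h
  | cons q t ih =>
    cases hb : q.1 == k
    · simp only [keyMem, List.any_cons, hb, Bool.false_or] at h
      simp only [pvGet, hb, Bool.false_eq_true, if_false]
      exact List.mem_cons_of_mem _ (ih h)
    · have hq : q.1 = k := eq_of_beq hb
      simp only [pvGet, hb, if_true]
      exact List.mem_cons.2 (Or.inl (by rw [← hq]))

theorem fst_map_procKeys (good : Int → Bool) (xs r : PvRow) :
    (procKeys good xs r).map Prod.fst = r.map Prod.fst := by
  simp only [procKeys, List.map_map]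
  apply List.map_congr_left
  intro se _
  simp only [Function.comp_apply]
  split <;> rfl

theorem procKeys_nil (good : Int → Bool) (r : PvRow) : procKeys good [] r = r := by
  simp [procKeys, keyMem]

theorem pvMod_procKeys (good : Int → Bool) (pre r : PvRow) (k : Int) (v : PvInner)
    (hp : keyMem pre k = false) :
    pvMod (procKeys good pre r) k (filtE good) = procKeys good (pre ++ [(k, v)]) r := by
  simp only [procKeys, pvMod, List.map_map]
  apply List.map_congr_left
  intro se _
  simp only [Function.comp_apply]
  cases hc : se.1 == k
  · have h2 : keyMem (pre ++ [(k, v)]) se.1 = keyMem pre se.1 := by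
      rw [keyMem_append]
      have hkv : keyMem [(k, v)] se.1 = false := by
        simp only [keyMem, List.any_cons, List.any_nil, Bool.or_false]
        cases hb : k == se.1
        · rfl
        · rw [eq_of_beq hb] at hc; simp at hc
      rw [hkv, Bool.or_false]
    rw [h2]
    cases hm : keyMem pre se.1 <;> simp [hm, hc]
  · have hk : se.1 = k := eq_of_beq hc
    have hpre : keyMem pre se.1 = false := by rw [hk]; exact hp
    have h2 : keyMem (pre ++ [(k, v)]) se.1 = true := by
      rw [keyMem_append]
      have : keyMem [(k, v)] se.1 = true := by
        simp only [keyMem, List.any_cons, List.any_nil, Bool.or_false]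
        rw [hk]; simp
      rw [this, Bool.or_true]
    rw [h2]
    simp [hpre, hc]

def step1 (i : Int) (d : PvTop) : PvTop :=
  let total_splitters : PySem.Set Int :=
    (pvGet d i []).foldl (fun s p => PySem.Set.add s p.1) PySem.Set.empty
  (pvGet d (i-1) []).foldl (fun d p =>
    let c := pvGet (pvGet (pvGet d (i-1) []) p.1 []) "beam_positions" []
    c.foldl (fun d pos =>
      if !(PySem.Set.contains total_splitters pos) then
        pvMod d (i-1) (fun row => pvMod row p.1 (fun e =>
          pvMod e "beam_positions" (fun l => (PySem.List.remove? l pos).getD l)))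
      else d) d) d

theorem contains_foldl_add_fst (row : PvRow) (x : Int) :
    PySem.Set.contains (row.foldl (fun s p => PySem.Set.add s p.1) PySem.Set.empty) x
      = keyMem row x := by
  apply bool_ext
  rw [PySem.Set.contains_iff, PySem.Set.mem_foldl_add]
  simp only [keyMem, List.any_eq_true, beq_iff_eq]
  constructor
  · rintro (h | ⟨p, hp, rfl⟩)
    · cases h
    · exact ⟨p, hp, rfl⟩
  · rintro ⟨p, hp, rfl⟩
    exact Or.inr ⟨p, hp, rfl⟩

theorem step1_aux (d : PvTop) (i : Int) (good : Int → Bool)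
    (htop : (d.map Prod.fst).Nodup)
    (hrows : ∀ p ∈ d, (p.2.map Prod.fst).Nodup ∧ ∀ q ∈ p.2, (q.2.map Prod.fst).Nodup) :
    ∀ (suff pre : PvRow), pvGet d (i-1) [] = pre ++ suff →
    suff.foldl (fun dd p =>
        (pvGet (pvGet (pvGet dd (i-1) []) p.1 []) "beam_positions" []).foldl (fun dd pos =>
          if !(good pos) then
            pvMod dd (i-1) (fun row => pvMod row p.1 (fun e =>
              pvMod e "beam_positions" (fun l => (PySem.List.remove? l pos).getD l)))
          else dd) dd)
      (pvMod d (i-1) (procKeys good pre))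
      = pvMod d (i-1) (procKeys good (pre ++ suff)) := by
  intro suff
  induction suff with
  | nil => intro pre _; simp
  | cons p suff ihs =>
    intro pre hrow
    have hne : pre ++ p :: suff ≠ [] := by simp
    have hkm : keyMem d (i-1) = true := by
      cases hb : keyMem d (i-1)
      · exfalso
        rw [pvGet_absent d (i-1) [] hb] at hrow
        exact hne hrow.symm
      · rfl
    have hmemrow : ((i-1 : Int), pre ++ p :: suff) ∈ d := by
      rw [← hrow]; exact pvGet_mem d (i-1) [] hkm
    have hrnd : ((pre ++ p :: suff).map Prod.fst).Nodup := (hrows _ hmemrow).1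
    have hinner : ∀ q ∈ pre ++ p :: suff, (q.2.map Prod.fst).Nodup := (hrows _ hmemrow).2
    have hpmem : p ∈ pre ++ p :: suff := List.mem_append_right _ (List.mem_cons_self)
    have hpne : keyMem pre p.1 = false := by
      rw [keyMem_eq_false_iff]
      intro hm
      have hdisj := List.disjoint_of_nodup_append (by rwa [List.map_append] at hrnd)
      exact hdisj hm (by simp)
    -- the head step
    have hstep : (pvGet (pvGet (pvGet (pvMod d (i-1) (procKeys good pre)) (i-1) []) p.1 [])
          "beam_positions" []).foldl (fun dd pos =>
          if !(good pos) then
            pvMod dd (i-1) (fun row => pvMod row p.1 (fun e =>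
              pvMod e "beam_positions" (fun l => (PySem.List.remove? l pos).getD l)))
          else dd) (pvMod d (i-1) (procKeys good pre))
        = pvMod d (i-1) (procKeys good (pre ++ [p])) := by
      have h1 : pvGet (pvMod d (i-1) (procKeys good pre)) (i-1) [] =
          procKeys good pre (pre ++ p :: suff) := by
        rw [pvGet_pvMod_self, hkm, if_pos rfl, hrow]
      have h2 : pvGet (procKeys good pre (pre ++ p :: suff)) p.1 [] = p.2 := by
        have := pvGet_mapIf (pre ++ p :: suff) (fun k => keyMem pre k) (filtE good) p []
          hrnd hpmem
        rw [show procKeys good pre (pre ++ p :: suff)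
            = (pre ++ p :: suff).map (fun se => if keyMem pre se.1 then (se.1, filtE good se.2) else se) from rfl]
        rw [this]
        simp [hpne]
      rw [h1, h2]
      set c := pvGet p.2 "beam_positions" [] with hc
      rw [foldl_pvMod_if c (pvMod d (i-1) (procKeys good pre)) (i-1) (fun pos => !(good pos))
        (fun pos => fun row => pvMod row p.1 (fun e =>
          pvMod e "beam_positions" (fun l => (PySem.List.remove? l pos).getD l)))]
      rw [pvMod_pvMod]
      apply pvMod_congr_at _ _ _ _ [] htop
      rw [hrow]
      -- goal: innerFold (procKeys good pre row) = procKeys good (pre ++ [p]) row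
      rw [foldl_pvMod_if c (procKeys good pre (pre ++ p :: suff)) p.1 (fun pos => !(good pos))
        (fun pos => fun e => pvMod e "beam_positions" (fun l => (PySem.List.remove? l pos).getD l))]
      have h3 : pvMod (procKeys good pre (pre ++ p :: suff)) p.1
            (fun e => c.foldl (fun e pos => if !(good pos) then
              pvMod e "beam_positions" (fun l => (PySem.List.remove? l pos).getD l) else e) e)
          = pvMod (procKeys good pre (pre ++ p :: suff)) p.1 (filtE good) := by
        apply pvMod_congr_at _ _ _ _ [] (by rw [fst_map_procKeys]; exact hrnd)
        rw [h2]
        rw [foldl_pvMod_if c p.2 "beam_positions" (fun pos => !(good pos))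
          (fun pos => fun l => (PySem.List.remove? l pos).getD l)]
        apply pvMod_congr_at _ _ _ _ [] (hinner p hpmem)
        rw [← hc]
        have := foldl_remove_filter good c [] (by intro x hx; cases hx)
        simpa using this
      rw [h3, pvMod_procKeys good pre _ p.1 p.2 hpne]
    rw [List.foldl_cons]
    have heq : (pre ++ p :: suff) = ((pre ++ [p]) ++ suff) := by simp
    rw [hstep, ihs (pre ++ [p]) (by rw [hrow, heq]), ← heq]

theorem step1_eq (d : PvTop) (i : Int)
    (htop : (d.map Prod.fst).Nodup)
    (hrows : ∀ p ∈ d, (p.2.map Prod.fst).Nodup ∧ ∀ q ∈ p.2, (q.2.map Prod.fst).Nodup) :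
    step1 i d = pvMod d (i-1) (filtRowA (fun x => keyMem (pvGet d i []) x)) := by
  have hg : ∀ pos : Int, PySem.Set.contains
      ((pvGet d i []).foldl (fun s p => PySem.Set.add s p.1) PySem.Set.empty) pos
      = keyMem (pvGet d i []) pos := contains_foldl_add_fst _
  show (pvGet d (i-1) []).foldl _ d = _
  simp only [hg]
  have h0eq : pvMod d (i-1) (procKeys (fun x => keyMem (pvGet d i []) x) []) = d := by
    calc pvMod d (i-1) (procKeys (fun x => keyMem (pvGet d i []) x) [])
        = pvMod d (i-1) (fun v => v) := by
          apply pvMod_congr_at _ _ _ _ [] htop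
          rw [procKeys_nil]
    _ = d := pvMod_id d (i-1)
  have haux := step1_aux d i (fun x => keyMem (pvGet d i []) x) htop hrows
    (pvGet d (i-1) []) [] (by simp)
  rw [h0eq] at haux
  rw [haux]
  apply pvMod_congr_at _ _ _ _ [] htop
  show procKeys _ _ _ = _
  rw [show ([] : PvRow) ++ pvGet d (i-1) [] = pvGet d (i-1) [] from by simp]
  simp only [procKeys, filtRowA]
  apply List.map_congr_left
  intro se hse
  rw [keyMem_of_mem hse]
  simp

theorem keyMem_pvGet_pvMod_filtRowA (d : PvTop) (k j x : Int) (good : Int → Bool) :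
    keyMem (pvGet (pvMod d k (filtRowA good)) j []) x = keyMem (pvGet d j []) x := by
  by_cases hjk : j = k
  · subst hjk
    rw [pvGet_pvMod_self]
    cases hb : keyMem d j
    · rw [pvGet_absent d j [] hb]
      simp
    · simp [keyMem_filtRowA]
  · rw [pvGet_pvMod_ne _ _ _ _ _ hjk]

theorem invRows_pvMod_filtRowA (d : PvTop) (k : Int) (good : Int → Bool)
    (hrows : ∀ p ∈ d, (p.2.map Prod.fst).Nodup ∧ ∀ q ∈ p.2, (q.2.map Prod.fst).Nodup) :
    ∀ p ∈ pvMod d k (filtRowA good), (p.2.map Prod.fst).Nodup ∧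
      ∀ q ∈ p.2, (q.2.map Prod.fst).Nodup := by
  intro p' hp'
  obtain ⟨p, hp, he⟩ := List.mem_map.1 hp'
  obtain ⟨h1, h2⟩ := hrows p hp
  by_cases hc : (p.1 == k) = true
  · rw [if_pos hc] at he
    subst he
    constructor
    · simpa [fst_map_filtRowA] using h1
    · intro q hq
      obtain ⟨se, hse, hqe⟩ := List.mem_map.1 hq
      subst hqe
      have := h2 se hse
      show ((pvMod se.2 "beam_positions" _).map Prod.fst).Nodup
      rwa [keys_pvMod]
  · rw [if_neg hc] at he
    subst he
    exact ⟨h1, h2⟩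

theorem nodup_keys_pvMod (d : PvTop) (k : Int) (Φ : PvRow → PvRow)
    (htop : (d.map Prod.fst).Nodup) : ((pvMod d k Φ).map Prod.fst).Nodup := by
  rwa [keys_pvMod]

theorem phase1_master : ∀ (I : List Int), I.Nodup → ∀ (d : PvTop),
    (d.map Prod.fst).Nodup →
    (∀ p ∈ d, (p.2.map Prod.fst).Nodup ∧ ∀ q ∈ p.2, (q.2.map Prod.fst).Nodup) →
    I.foldl (fun d i => step1 i d) d
      = d.map (fun rr => if (rr.1 + 1) ∈ I then
          (rr.1, filtRowA (fun x => keyMem (pvGet d (rr.1+1) []) x) rr.2) else rr) := by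
  intro I
  induction I with
  | nil => intro _ d _ _; simp
  | cons i I' ih =>
    intro hI d htop hrows
    rw [List.foldl_cons]
    have hstep := step1_eq d i htop hrows
    have IH := ih (List.Nodup.of_cons hI) (step1 i d)
      (by rw [hstep]; exact nodup_keys_pvMod _ _ _ htop)
      (by rw [hstep]; exact invRows_pvMod_filtRowA _ _ _ hrows)
    rw [IH, hstep]
    have hi : i ∉ I' := (List.nodup_cons.1 hI).1
    show (pvMod d (i-1) _).map _ = _
    rw [pvMod]
    rw [List.map_map]
    apply List.map_congr_left
    intro rr hrr
    simp only [Function.comp_apply]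
    have hstab : ∀ j x, keyMem (pvGet (pvMod d (i-1)
        (filtRowA (fun x => keyMem (pvGet d i []) x))) j []) x = keyMem (pvGet d j []) x :=
      fun j x => keyMem_pvGet_pvMod_filtRowA d (i-1) j x _
    cases hki : rr.1 == (i-1 : Int)
    · simp only [Bool.false_eq_true, if_false]
      have hne : rr.1 + 1 ≠ i := by
        have h := beq_eq_false_iff_ne.mp hki
        omega
      by_cases hm : rr.1 + 1 ∈ I'
      · rw [if_pos hm, if_pos (List.mem_cons_of_mem _ hm)]
        have hfun : (fun x => keyMem (pvGet (List.map
            (fun p => if (p.1 == i - 1 : Bool) then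
              (p.1, filtRowA (fun x => keyMem (pvGet d i []) x) p.2) else p) d) (rr.1+1) []) x)
            = (fun x => keyMem (pvGet d (rr.1+1) []) x) := funext (fun x => hstab _ x)
        rw [hfun]
      · rw [if_neg hm, if_neg (by simp [List.mem_cons, hne, hm])]
    · rw [if_pos rfl]
      have hk : rr.1 = i - 1 := eq_of_beq hki
      have h1 : rr.1 + 1 = i := by omega
      simp only [h1]
      rw [if_neg (by simpa using hi), if_pos (by simp)]

def step2 (i : Int) (d : PvTop) : PvTop :=
  let beam_set : PySem.Set Int :=
    (pvGet d (i-1) []).foldl (fun s p => PySem.Set.update s (pvGet p.2 "beam_positions" []))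
      PySem.Set.empty
  let splitters : PySem.Set Int :=
    (pvGet d i []).foldl (fun s p =>
      if !(PySem.Set.contains beam_set p.1)
          || (pvGet (pvGet (pvGet d i []) p.1 []) "beam_positions" []).length == 0
      then PySem.Set.add s p.1 else s) PySem.Set.empty
  splitters.foldl (fun d k => pvMod d i (fun row => pvDel row k)) d

theorem contains_beam_fold (row : PvRow) (x : Int) :
    PySem.Set.contains (row.foldl (fun s p => PySem.Set.update s (pvGet p.2 "beam_positions" []))
      PySem.Set.empty) x = beamB row x := by
  apply bool_ext
  rw [PySem.Set.contains_iff, mem_foldl_update]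
  simp only [beamB, decide_eq_true_eq]
  constructor
  · rintro (h | h)
    · cases h
    · exact h
  · exact Or.inr

theorem step2_eq (d : PvTop) (i : Int)
    (htop : (d.map Prod.fst).Nodup)
    (hrows : ∀ p ∈ d, (p.2.map Prod.fst).Nodup ∧ ∀ q ∈ p.2, (q.2.map Prod.fst).Nodup) :
    step2 i d = pvMod d i (fun r => r.filter (keepB (pvGet d (i-1) []))) := by
  have hbs : ∀ x : Int, PySem.Set.contains
      ((pvGet d (i-1) []).foldl (fun s p => PySem.Set.update s (pvGet p.2 "beam_positions" []))
        PySem.Set.empty) x = beamB (pvGet d (i-1) []) x := contains_beam_fold _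
  show (((pvGet d i []).foldl _ PySem.Set.empty).foldl _ d) = _
  simp only [hbs]
  cases hkm : keyMem d i
  · rw [pvGet_absent d i [] hkm]
    show List.foldl _ d ([] : List Int) = _
    rw [List.foldl_nil, pvMod_absent d i _ hkm]
  · have hmemrow : (i, pvGet d i []) ∈ d := pvGet_mem d i [] hkm
    have hrownd : ((pvGet d i []).map Prod.fst).Nodup := (hrows _ hmemrow).1
    rw [foldl_pvMod _ d i (fun k => fun row => pvDel row k)]
    apply pvMod_congr_at _ _ _ _ [] htop
    rw [foldl_pvDel]
    apply List.filter_congr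
    intro se hse
    have hsplit : ∀ x : Int, (((pvGet d i []).foldl (fun s p =>
        if !(beamB (pvGet d (i-1) []) p.1)
            || (pvGet (pvGet (pvGet d i []) p.1 []) "beam_positions" []).length == 0
        then PySem.Set.add s p.1 else s) PySem.Set.empty).any (fun y => x == y)) = true
        ↔ ∃ p ∈ pvGet d i [],
          (!(beamB (pvGet d (i-1) []) p.1)
            || ((pvGet (pvGet (pvGet d i []) p.1 []) "beam_positions" []).length == 0)) = true
          ∧ x = p.1 := by
      intro x
      rw [List.any_eq_true]
      constructor
      · rintro ⟨y, hy, he⟩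
        have := (mem_foldl_add_if _ _ _ _ _).1 hy
        rcases this with h | ⟨p, hp, hc, he2⟩
        · cases h
        · exact ⟨p, hp, hc, by rw [eq_of_beq he, he2]⟩
      · rintro ⟨p, hp, hc, he⟩
        refine ⟨p.1, (mem_foldl_add_if _ _ _ _ _).2 (Or.inr ⟨p, hp, hc, rfl⟩), by rw [he]; simp⟩
    have hchain : pvGet (pvGet (pvGet d i []) se.1 []) "beam_positions" []
        = pvGet se.2 "beam_positions" [] := by
      rw [pvGet_of_mem _ _ _ _ hrownd hse]
    apply bool_ext
    rw [Bool.not_eq_true', ← Bool.not_eq_true, hsplit se.1]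
    constructor
    · intro hnot
      cases hbm : beamB (pvGet d (i-1) []) se.1
      · exact absurd ⟨se, hse, by simp [hbm], rfl⟩ hnot
      · cases hlen : ((pvGet se.2 "beam_positions" []).length == 0)
        · show keepB _ se = true
          rw [keepB, hbm, hlen]
          rfl
        · exact absurd ⟨se, hse, by rw [hchain, hlen]; simp, rfl⟩ hnot
    · intro hkeep
      rintro ⟨p, hp, hc, he⟩
      have hpe : p = se := mem_eq_of_nodup _ p se hrownd hp hse (he.symm)
      subst hpe
      rw [hchain] at hc
      rw [keepB] at hkeep
      obtain ⟨hb1, hb2⟩ := (Bool.and_eq_true _ _).mp hkeep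
      rw [hb1] at hc
      simp only [Bool.not_true, Bool.false_or] at hc
      rw [hc] at hb2
      cases hb2

theorem invRows_pvMod_filter (d : PvTop) (k : Int) (g : Int × PvInner → Bool)
    (hrows : ∀ p ∈ d, (p.2.map Prod.fst).Nodup ∧ ∀ q ∈ p.2, (q.2.map Prod.fst).Nodup) :
    ∀ p ∈ pvMod d k (fun r => r.filter g), (p.2.map Prod.fst).Nodup ∧
      ∀ q ∈ p.2, (q.2.map Prod.fst).Nodup := by
  intro p' hp'
  obtain ⟨p, hp, he⟩ := List.mem_map.1 hp'
  obtain ⟨h1, h2⟩ := hrows p hp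
  by_cases hc : (p.1 == k) = true
  · rw [if_pos hc] at he
    subst he
    refine ⟨List.Nodup.sublist (List.Sublist.map _ List.filter_sublist) h1, ?_⟩
    intro q hq
    exact h2 q (List.mem_of_mem_filter hq)
  · rw [if_neg hc] at he
    subst he
    exact ⟨h1, h2⟩

theorem phase2_master : ∀ (I : List Int), I.Pairwise (· > ·) → ∀ (d : PvTop),
    (d.map Prod.fst).Nodup →
    (∀ p ∈ d, (p.2.map Prod.fst).Nodup ∧ ∀ q ∈ p.2, (q.2.map Prod.fst).Nodup) →
    I.foldl (fun d i => step2 i d) d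
      = d.map (fun rr => if rr.1 ∈ I then
          (rr.1, rr.2.filter (keepB (pvGet d (rr.1-1) []))) else rr) := by
  intro I
  induction I with
  | nil => intro _ d _ _; simp
  | cons i I' ih =>
    intro hI d htop hrows
    rw [List.foldl_cons]
    have hlt : ∀ j ∈ I', j < i := fun j hj => (List.pairwise_cons.1 hI).1 j hj
    have hstep := step2_eq d i htop hrows
    have IH := ih (List.pairwise_cons.1 hI).2 (step2 i d)
      (by rw [hstep]; exact nodup_keys_pvMod _ _ _ htop)
      (by rw [hstep]; exact invRows_pvMod_filter _ _ _ hrows)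
    rw [IH, hstep]
    show (pvMod d i _).map _ = _
    rw [pvMod, List.map_map]
    apply List.map_congr_left
    intro rr hrr
    simp only [Function.comp_apply]
    cases hki : rr.1 == (i : Int)
    · simp only [Bool.false_eq_true, if_false]
      have hne : rr.1 ≠ i := beq_eq_false_iff_ne.mp hki
      by_cases hm : rr.1 ∈ I'
      · rw [if_pos hm, if_pos (List.mem_cons_of_mem _ hm)]
        have hlow : rr.1 - 1 ≠ i := by have := hlt _ hm; omega
        have hrow : pvGet (List.map (fun p => if (p.1 == i : Bool) then
            (p.1, p.2.filter (keepB (pvGet d (i-1) []))) else p) d) (rr.1-1) []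
            = pvGet d (rr.1-1) [] :=
          pvGet_pvMod_ne d i (rr.1-1) _ [] hlow
        rw [hrow]
      · rw [if_neg hm, if_neg (by simp [List.mem_cons, hne, hm])]
    · rw [if_pos rfl]
      have hk : rr.1 = i := eq_of_beq hki
      have hni : rr.1 ∉ I' := by rw [hk]; intro h; exact absurd (hlt _ h) (lt_irrefl i)
      rw [if_neg (by simpa using hni), if_pos (by rw [hk]; exact List.mem_cons_self), hk]

-- assembly


theorem decide_pos_eq_not_beq_zero (m : Nat) : decide (0 < m) = !(m == 0) := by
  cases m <;> simp

theorem keyMem_true_of_mem_keys (e : PvInner) (hmem : "beam_positions" ∈ e.map Prod.fst) :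
    keyMem e "beam_positions" = true := by
  cases hb : keyMem e "beam_positions"
  · exact absurd hmem ((keyMem_eq_false_iff _ _).1 hb)
  · rfl

theorem pvSet_eq_pvMod_filter (e : PvInner) (good : Int → Bool)
    (hmem : "beam_positions" ∈ e.map Prod.fst) (hnd : (e.map Prod.fst).Nodup) :
    pvSet e "beam_positions" ((pvGet e "beam_positions" []).filter good)
      = pvMod e "beam_positions" (fun l => l.filter good) := by
  rw [pvSet, if_pos (show (List.any e fun p => p.1 == "beam_positions") = true from
    keyMem_true_of_mem_keys e hmem)]
  exact pvMod_congr_at _ _ _ _ [] hnd rfl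

theorem fst_map_f1 (data : PvTop) (D : List Int) :
    ((data.map (fun rr => if (rr.1 + 1) ∈ D then
        (rr.1, filtRowA (fun x => keyMem (pvGet data (rr.1+1) []) x) rr.2) else rr)).map
      Prod.fst) = data.map Prod.fst := by
  rw [List.map_map]
  apply List.map_congr_left
  intro rr _
  simp only [Function.comp_apply]
  split <;> rfl

theorem invRows_map_f1 (data : PvTop) (D : List Int)
    (hrows : ∀ p ∈ data, (p.2.map Prod.fst).Nodup ∧ ∀ q ∈ p.2, (q.2.map Prod.fst).Nodup) :
    ∀ p ∈ data.map (fun rr => if (rr.1 + 1) ∈ D then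
        (rr.1, filtRowA (fun x => keyMem (pvGet data (rr.1+1) []) x) rr.2) else rr),
      (p.2.map Prod.fst).Nodup ∧ ∀ q ∈ p.2, (q.2.map Prod.fst).Nodup := by
  intro p' hp'
  obtain ⟨p, hp, he⟩ := List.mem_map.1 hp'
  by_cases hc : (p.1 + 1) ∈ D
  · rw [if_pos hc] at he
    subst he
    constructor
    · simpa [fst_map_filtRowA] using (hrows p hp).1
    · intro q hq
      obtain ⟨se, hse, hqe⟩ := List.mem_map.1 hq
      subst hqe
      have := (hrows p hp).2 se hse
      show ((pvMod se.2 "beam_positions" _).map Prod.fst).Nodup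
      rwa [keys_pvMod]
  · rw [if_neg hc] at he
    subst he
    exact hrows p hp

-- ===== VERDICT (by name: the statement is the Claim_ definition above) =====
theorem create_viable_paths_dictionary_spec : Claim_equal_create_viable_paths_dictionary := by
  unfold Claim_equal_create_viable_paths_dictionary
  intro data _hdom hpre
  obtain ⟨htop, hrows, hdisj⟩ := hpre
  show create_viable_paths_dictionary data = create_viable_paths_dictionary_alt data
  have hA : create_viable_paths_dictionary data
      = (PySem.List.pyRange (data.length : Int) 1 (-1)).foldl (fun d i => step2 i d)
        ((PySem.List.pyRange (data.length : Int) 1 (-1)).foldl (fun d i => step1 i d) data) := rfl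
  rw [hA, phase1_master _ (nodup_pyRange_desc _) data htop hrows,
    phase2_master _ (pairwise_gt_pyRange_desc _) _
      (by rw [fst_map_f1]; exact htop)
      (invRows_map_f1 data _ hrows)]
  have hmap1 : data.map (fun rr => if (rr.1 + 1) ∈ PySem.List.pyRange (data.length : Int) 1 (-1)
        then (rr.1, filtRowA (fun x => keyMem (pvGet data (rr.1+1) []) x) rr.2) else rr)
      = data.map (fun rr => if 1 ≤ rr.1 ∧ rr.1 ≤ (data.length : Int) - 1 then
          (rr.1, rr.2.map (fun se => (se.1, pvSet se.2 "beam_positions"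
            ((pvGet se.2 "beam_positions" []).filter
              (fun p => (pvGet data (rr.1 + 1) []).any (fun q => q.1 == p))))))
        else rr) := by
    apply List.map_congr_left
    intro rr hrr
    have hcond : ((rr.1 + 1) ∈ PySem.List.pyRange (data.length : Int) 1 (-1))
        ↔ (1 ≤ rr.1 ∧ rr.1 ≤ (data.length : Int) - 1) := by
      rw [mem_pyRange_desc]; omega
    by_cases hc : 1 ≤ rr.1 ∧ rr.1 ≤ (data.length : Int) - 1
    · rw [if_pos (hcond.2 hc), if_pos hc]
      have hn2 : ¬ (data.length ≤ 1) := by omega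
      have hbeam : ∀ p ∈ data, ∀ q ∈ p.2, "beam_positions" ∈ q.2.map Prod.fst :=
        (hdisj.resolve_left hn2).2
      congr 1
      show filtRowA _ rr.2 = _
      rw [filtRowA]
      apply List.map_congr_left
      intro se hse
      congr 1
      show filtE _ se.2 = _
      rw [filtE, ← pvSet_eq_pvMod_filter se.2 _ (hbeam rr hrr se hse) ((hrows rr hrr).2 se hse)]
      rfl
    · rw [if_neg (fun h => hc (hcond.1 h)), if_neg hc]
  rw [hmap1]
  have hB : create_viable_paths_dictionary_alt data
      = (data.map (fun rr => if 1 ≤ rr.1 ∧ rr.1 ≤ (data.length : Int) - 1 then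
          (rr.1, rr.2.map (fun se => (se.1, pvSet se.2 "beam_positions"
            ((pvGet se.2 "beam_positions" []).filter
              (fun p => (pvGet data (rr.1 + 1) []).any (fun q => q.1 == p))))))
        else rr)).map (fun rr => if 2 ≤ rr.1 ∧ rr.1 ≤ (data.length : Int) then
          (rr.1, rr.2.filter (fun se => PySem.Set.contains
            ((pvGet (data.map (fun rr => if 1 ≤ rr.1 ∧ rr.1 ≤ (data.length : Int) - 1 then
              (rr.1, rr.2.map (fun se => (se.1, pvSet se.2 "beam_positions"
                ((pvGet se.2 "beam_positions" []).filter
                  (fun p => (pvGet data (rr.1 + 1) []).any (fun q => q.1 == p))))))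
              else rr)) (rr.1 - 1) []).foldl
                (fun s p => PySem.Set.update s (pvGet p.2 "beam_positions" [])) PySem.Set.empty)
            se.1 && decide (0 < (pvGet se.2 "beam_positions" []).length)))
        else rr) := rfl
  rw [hB]
  apply List.map_congr_left
  intro rr hrr
  have hcond2 : (rr.1 ∈ PySem.List.pyRange (data.length : Int) 1 (-1))
      ↔ (2 ≤ rr.1 ∧ rr.1 ≤ (data.length : Int)) := mem_pyRange_desc _ _
  by_cases hc : 2 ≤ rr.1 ∧ rr.1 ≤ (data.length : Int)
  · rw [if_pos (hcond2.2 hc), if_pos hc]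
    congr 1
    apply List.filter_congr
    intro se hse
    rw [keepB, ← contains_beam_fold, ← decide_pos_eq_not_beq_zero]
  · rw [if_neg (fun h => hc (hcond2.1 h)), if_neg hc]
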